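-- pv_equiv track=rewrite | github.com/Audix-Robotics/High-Level | src/audix_pkg/scripts/warehouse_fleet_manager.py | _fleet_mode_from_states
-- ===== SOURCE A (Python) =====
-- def _fleet_mode_from_states(states):
--     if not states:
--         return 'IDLE'
--     if any(state == 'ERROR' for state in states):
--         return 'HALTED'
--     if any(state in ('MOVING', 'SCANNING') for state in states):
--         return 'NAVIGATING'
--     if any(state == 'SPAWNING' for state in states):
--         return 'SPAWNING'
--     return 'IDLE'
-- ===== SOURCE B (Python) =====
-- _RANK = {'ERROR': 0, 'MOVING': 1, 'SCANNING': 1, 'SPAWNING': 2}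
-- _MODE = {0: 'HALTED', 1: 'NAVIGATING', 2: 'SPAWNING', 3: 'IDLE'}
--
-- def _fleet_mode_from_states(states):
--     r = 3
--     for state in states:
--         r = min(r, _RANK.get(state, 3))
--     return _MODE[r]
-- ===== Notes on version B (the rewrite author's own statement) =====
-- stated objective: alternative
-- what changed: Replaces A's three ordered any-scans with a single fold that tracks the minimum priority rank (ERROR=0, MOVING/SCANNING=1, SPAWNING=2, other=3) and maps the final rank to the mode name.
import Mathlib
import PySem

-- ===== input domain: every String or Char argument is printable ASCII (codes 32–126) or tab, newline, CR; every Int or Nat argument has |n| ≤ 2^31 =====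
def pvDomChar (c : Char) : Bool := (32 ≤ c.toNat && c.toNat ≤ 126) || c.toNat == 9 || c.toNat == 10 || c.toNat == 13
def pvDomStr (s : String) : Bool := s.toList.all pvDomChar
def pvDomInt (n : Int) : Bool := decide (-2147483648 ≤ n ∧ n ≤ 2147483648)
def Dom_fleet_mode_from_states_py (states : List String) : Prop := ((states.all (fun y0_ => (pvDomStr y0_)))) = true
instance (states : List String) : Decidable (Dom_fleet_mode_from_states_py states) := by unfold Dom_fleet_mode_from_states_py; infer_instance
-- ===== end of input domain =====

-- B replaces A's three ordered any-scans with one fold over a state→priority-rank table; alternative decomposition, same cost.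

-- ===== PORT A =====
def fleet_mode_from_states_py (states : List String) : String :=
  if states = [] then "IDLE"
  else if states.any (fun state => state == "ERROR") then "HALTED"
  else if states.any (fun state => state == "MOVING" || state == "SCANNING") then "NAVIGATING"
  else if states.any (fun state => state == "SPAWNING") then "SPAWNING"
  else "IDLE"

-- ===== PORT B =====
-- _RANK.get(state, 3)
def pvRank (s : String) : Nat :=
  (PySem.Dict.ofList [("ERROR", 0), ("MOVING", 1), ("SCANNING", 1), ("SPAWNING", 2)]).getD s 3

def fleet_mode_from_states_py_alt (states : List String) : String :=
  let r := states.foldl (fun r state => min r (pvRank state)) 3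
  (PySem.Dict.ofList [(0, "HALTED"), (1, "NAVIGATING"), (2, "SPAWNING"), (3, "IDLE")]).getD r ""

-- ===== PRECONDITION & SPEC =====
def Spec_fleet_mode_from_states_py (states : List String) (out : String) : Prop := out = fleet_mode_from_states_py_alt states
instance (states : List String) (out : String) : Decidable (Spec_fleet_mode_from_states_py states out) := by unfold Spec_fleet_mode_from_states_py; infer_instance

-- ===== CLAIM (what is proved, stated in full; the proofs are below) =====
def Claim_equal_fleet_mode_from_states_py : Prop := ∀ (states : List String), Dom_fleet_mode_from_states_py states → Spec_fleet_mode_from_states_py states (fleet_mode_from_states_py states)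

-- ===== LEMMAS AND PROOFS =====

-- _RANK.get, spelled out branch by branch
theorem pvRank_eq (s : String) : pvRank s =
    if s = "ERROR" then 0 else if s = "MOVING" then 1 else if s = "SCANNING" then 1
    else if s = "SPAWNING" then 2 else 3 := by
  unfold pvRank
  split_ifs with h0 h1 h2 h3 <;> subst_vars <;> first | rfl | skip
  show ((PySem.Dict.mk [("ERROR", 0), ("MOVING", 1), ("SCANNING", 1), ("SPAWNING", 2)]).get? s).getD 3 = 3
  rw [PySem.Dict.get?_mk_cons, if_neg (by simp [Ne.symm h0]),
      PySem.Dict.get?_mk_cons, if_neg (by simp [Ne.symm h1]),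
      PySem.Dict.get?_mk_cons, if_neg (by simp [Ne.symm h2]),
      PySem.Dict.get?_mk_cons, if_neg (by simp [Ne.symm h3])]
  rfl

theorem pvRank_le (s : String) : pvRank s ≤ 3 := by
  rw [pvRank_eq]; split_ifs <;> omega

-- pulling the accumulator out of the fold
theorem pvFoldMin_acc (l : List String) (m : Nat) (hm : m ≤ 3) :
    l.foldl (fun r state => min r (pvRank state)) m
      = min m (l.foldl (fun r state => min r (pvRank state)) 3) := by
  induction l generalizing m with
  | nil => simp [List.foldl]; omega
  | cons s t ih =>
    have hr := pvRank_le s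
    simp only [List.foldl]
    rw [ih (min m (pvRank s)) (by omega), ih (min 3 (pvRank s)) (by omega)]
    omega

-- the fold's result, characterised by A's three scans
theorem pvFold_char (l : List String) :
    l.foldl (fun r state => min r (pvRank state)) 3
      = (if l.any (fun state => state == "ERROR") then 0
         else if l.any (fun state => state == "MOVING" || state == "SCANNING") then 1
         else if l.any (fun state => state == "SPAWNING") then 2
         else 3) := by
  induction l with
  | nil => simp
  | cons s t ih =>
    simp only [List.foldl, List.any_cons]
    rw [pvFoldMin_acc _ _ (by have := pvRank_le s; omega), ih, pvRank_eq]
    by_cases h0 : s = "ERROR" <;> by_cases h1 : s = "MOVING" <;>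
      by_cases h2 : s = "SCANNING" <;> by_cases h3 : s = "SPAWNING" <;>
      subst_vars <;> simp_all <;> split_ifs <;> simp_all <;> omega

-- ===== VERDICT (by name: the statement is the Claim_ definition above) =====
theorem fleet_mode_from_states_py_spec : Claim_equal_fleet_mode_from_states_py := by
  intro states _
  unfold Spec_fleet_mode_from_states_py fleet_mode_from_states_py fleet_mode_from_states_py_alt
  rw [pvFold_char]
  cases states with
  | nil => decide
  | cons s t =>
    rw [if_neg (by simp)]
    split_ifs <;> decide
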